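-- pv_equiv track=rewrite | github.com/AVasilkovski/typedb-ops-spine | typedb_ops_spine/schema_apply.py | compute_transitive_subtypes
-- ===== SOURCE A (Python) =====
-- def compute_transitive_subtypes(parent_of: dict[str, str]) -> dict[str, set[str]]:
--     """Compute the full subtype closure for each supertype."""
--     children_of: dict[str, set[str]] = {}
--     for child, parent in parent_of.items():
--         children_of.setdefault(parent, set()).add(child)
--
--     subtypes: dict[str, set[str]] = {}
--
--     def _all_children(type_label: str) -> set[str]:
--         if type_label in subtypes:
--             return subtypes[type_label]
--
--         children = set(children_of.get(type_label, set()))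
--         for child in list(children):
--             children.update(_all_children(child))
--         subtypes[type_label] = children
--         return children
--
--     for type_label in list(children_of):
--         _all_children(type_label)
--
--     return subtypes
-- ===== SOURCE B (Python) =====
-- def compute_transitive_subtypes(parent_of: dict[str, str]) -> dict[str, set[str]]:
--     """Compute the full subtype closure for each supertype, iteratively.
--
--     Explicit-stack post-order traversal instead of memoized recursion: a node is
--     finalized only once none of its children is still pending, so each node's
--     descendant set is assembled from already-finished child sets.
--     """
--     children_of: dict[str, set[str]] = {}
--     for child, parent in parent_of.items():
--         children_of.setdefault(parent, set()).add(child)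
--
--     subtypes: dict[str, set[str]] = {}
--     for root in children_of:
--         stack = [root]
--         while stack:
--             node = stack.pop()
--             if node in subtypes:
--                 continue
--             pending = [c for c in children_of.get(node, ()) if c not in subtypes]
--             if pending:
--                 stack.append(node)
--                 stack.extend(reversed(pending))
--             else:
--                 result = set(children_of.get(node, ()))
--                 for c in list(result):
--                     result |= subtypes[c]
--                 subtypes[node] = result
--     return subtypes
-- ===== Notes on version B (the rewrite author's own statement) =====
-- stated objective: alternative
-- what changed: A's memoized recursive helper (_all_children) is replaced by an iterative explicit-stack post-order traversal: each node is pushed, its unfinished children are pushed above it, and a node is finalized from its children's already-computed closure sets once none of its children is pending; no recursion and no closure over the memo dict.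
import Mathlib
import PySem

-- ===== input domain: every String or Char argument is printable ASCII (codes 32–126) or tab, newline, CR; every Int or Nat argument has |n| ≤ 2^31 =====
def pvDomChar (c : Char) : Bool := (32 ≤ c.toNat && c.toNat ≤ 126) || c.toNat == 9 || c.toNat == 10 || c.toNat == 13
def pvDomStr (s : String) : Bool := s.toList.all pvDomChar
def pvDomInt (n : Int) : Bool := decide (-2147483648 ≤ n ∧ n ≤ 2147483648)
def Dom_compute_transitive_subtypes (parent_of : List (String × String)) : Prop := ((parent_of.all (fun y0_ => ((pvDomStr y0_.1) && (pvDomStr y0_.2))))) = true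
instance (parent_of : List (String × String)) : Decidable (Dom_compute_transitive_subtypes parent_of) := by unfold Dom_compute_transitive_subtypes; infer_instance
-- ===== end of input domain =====

-- B replaces A's memoized recursion by an explicit-stack post-order traversal (same return value; no side effects in either).

-- ===== PORT A =====
-- children_of = {}; for child, parent in parent_of.items(): children_of.setdefault(parent, set()).add(child)
def ctsChildrenA (parent_of : List (String × String)) : PySem.Dict String (PySem.Set String) :=
  (PySem.Dict.ofList parent_of).items.foldl
    (fun co cp => co.modify cp.2 PySem.Set.empty (fun s => s.add cp.1)) PySem.Dict.empty

-- _all_children, memoized recursion; fuel is a totality guard only (depth ≤ #keys + 1;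
-- the recursion is infinite exactly on the cyclic inputs Pre_ excludes).
mutual
def ctsAll (co : PySem.Dict String (PySem.Set String)) :
    Nat → PySem.Dict String (PySem.Set String) → String →
    Option (PySem.Dict String (PySem.Set String) × PySem.Set String)
  | 0, _, _ => none
  | fuel+1, memo, t =>
    match memo.get? t with
    | some s => some (memo, s)                       -- if type_label in subtypes: return subtypes[type_label]
    | none =>
      -- children = set(children_of.get(type_label, set())); for child in list(children): children.update(_all_children(child))
      match ctsKids co fuel memo (co.getD t PySem.Set.empty) (co.getD t PySem.Set.empty) with
      | none => none
      | some (m, res) => some (m.insert t res, res)  -- subtypes[type_label] = children; return children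
termination_by fuel _ _ => (fuel, 0)

def ctsKids (co : PySem.Dict String (PySem.Set String)) :
    Nat → PySem.Dict String (PySem.Set String) → List String → PySem.Set String →
    Option (PySem.Dict String (PySem.Set String) × PySem.Set String)
  | _, memo, [], acc => some (memo, acc)
  | fuel, memo, c :: rest, acc =>
    match ctsAll co fuel memo c with
    | none => none
    | some (m, s) => ctsKids co fuel m rest (acc.update s)
termination_by fuel _ l _ => (fuel, l.length + 1)
end

def compute_transitive_subtypes (parent_of : List (String × String)) : List (String × List String) :=
  let children_of := ctsChildrenA parent_of
  -- for type_label in list(children_of): _all_children(type_label)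
  (children_of.keys.foldl
    (fun memo t =>
      match ctsAll children_of (parent_of.length + 2) memo t with
      | some (m, _) => m
      | none => memo)
    PySem.Dict.empty).items

-- ===== PORT B =====
def ctsChildrenB (parent_of : List (String × String)) : PySem.Dict String (PySem.Set String) :=
  (PySem.Dict.ofList parent_of).items.foldl
    (fun co cp => co.modify cp.2 PySem.Set.empty (fun s => s.add cp.1)) PySem.Dict.empty

-- the 'while stack:' loop; stack is a Lean list with its head = top (pop from / push on the left,
-- 'stack.append(node); stack.extend(reversed(pending))' = pending ++ node :: stack);
-- fuel is a totality guard only (the loop runs forever exactly on the cyclic inputs Pre_ excludes)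
def ctsLoop (co : PySem.Dict String (PySem.Set String)) :
    Nat → List String → PySem.Dict String (PySem.Set String) →
    Option (PySem.Dict String (PySem.Set String))
  | 0, _, _ => none
  | _+1, [], memo => some memo
  | fuel+1, node :: stack, memo =>
    if memo.contains node then ctsLoop co fuel stack memo    -- if node in subtypes: continue
    else
      -- pending = [c for c in children_of.get(node, ()) if c not in subtypes]
      if ((co.getD node PySem.Set.empty).filter (fun c => !(memo.contains c))).isEmpty then
        -- result = set(children_of.get(node, ())); for c in list(result): result |= subtypes[c]; subtypes[node] = result
        ctsLoop co fuel stack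
          (memo.insert node
            ((co.getD node PySem.Set.empty).foldl
              (fun s c => s.union (memo.getD c PySem.Set.empty)) (co.getD node PySem.Set.empty)))
      else
        ctsLoop co fuel
          (((co.getD node PySem.Set.empty).filter (fun c => !(memo.contains c))) ++ node :: stack) memo

def compute_transitive_subtypes_alt (parent_of : List (String × String)) : List (String × List String) :=
  let children_of := ctsChildrenB parent_of
  (children_of.keys.foldl
    (fun memo root =>
      match ctsLoop children_of (2 * (parent_of.length + 2) ^ (parent_of.length + 2) + 1) [root] memo with
      | some m => m
      | none => memo)
    PySem.Dict.empty).items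

-- ===== PRECONDITION & SPEC =====
-- the parent chain from s, followed n steps (None once it leaves the dict's keys)
def ctsIter (d : PySem.Dict String String) : Nat → String → Option String
  | 0, s => some s
  | n+1, s =>
    match d.get? s with
    | none => none
    | some p => ctsIter d n p

-- Pre_ is the forest condition: from every key the parent chain dies out (no cycle).
-- On cyclic inputs A's recursion never terminates (Python RecursionError), so those inputs are excluded.
def Pre_compute_transitive_subtypes (parent_of : List (String × String)) : Prop :=
  ∀ cp ∈ parent_of, ctsIter (PySem.Dict.ofList parent_of) (parent_of.length + 1) cp.1 = none
instance (parent_of : List (String × String)) : Decidable (Pre_compute_transitive_subtypes parent_of) := by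
  unfold Pre_compute_transitive_subtypes; infer_instance

def pvWitness_compute_transitive_subtypes : (List (String × String)) :=
  [("dog", "animal"), ("cat", "animal"), ("animal", "entity")]

def Spec_compute_transitive_subtypes (parent_of : List (String × String)) (out : List (String × List String)) : Prop := out = compute_transitive_subtypes_alt parent_of
instance (parent_of : List (String × String)) (out : List (String × List String)) : Decidable (Spec_compute_transitive_subtypes parent_of out) := by unfold Spec_compute_transitive_subtypes; infer_instance

-- ===== CLAIM (what is proved, stated in full; the proofs are below) =====
def Claim_equal_compute_transitive_subtypes : Prop := ∀ (parent_of : List (String × String)), Dom_compute_transitive_subtypes parent_of → Pre_compute_transitive_subtypes parent_of → Spec_compute_transitive_subtypes parent_of (compute_transitive_subtypes parent_of)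

-- ===== LEMMAS AND PROOFS =====

-- x reaches t by following parent links
def ctsReach (d : PySem.Dict String String) (x t : String) : Prop := ∃ j, ctsIter d j x = some t

-- fuel budget for one ctsLoop-processing of a node, as a function of the ctsAll fuel
def ctsBud (N f : Nat) : Nat := 2 * (N + 2) ^ f

-- l' is l with some elements satisfying P dropped
inductive ctsSkip (P : String → Prop) : List String → List String → Prop
  | nil : ctsSkip P [] []
  | keep (x : String) {l l' : List String} : ctsSkip P l l' → ctsSkip P (x :: l) (x :: l')
  | drop (x : String) {l l' : List String} : P x → ctsSkip P l l' → ctsSkip P (x :: l) l'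

-- the simulation invariants, indexed by the ctsAll fuel
def ctsAllP (co : PySem.Dict String (PySem.Set String)) (d : PySem.Dict String String) (N f : Nat) : Prop :=
  ∀ memo t m s, ctsAll co f memo t = some (m, s) →
    ((∀ x v, memo.get? x = some v → m.get? x = some v) ∧
     m.get? t = some s ∧
     (∀ x, memo.get? x = none → (m.get? x).isSome → ctsReach d x t) ∧
     (∀ stack f' r, ctsLoop co f' stack m = some r →
        ctsLoop co (f' + ctsBud N f) (t :: stack) memo = some r))

def ctsKidsP (co : PySem.Dict String (PySem.Set String)) (d : PySem.Dict String String) (N f : Nat) : Prop :=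
  ∀ l memo acc m res, ctsKids co f memo l acc = some (m, res) →
    ((∀ x v, memo.get? x = some v → m.get? x = some v) ∧
     (∀ c ∈ l, (m.get? c).isSome) ∧
     (∀ x, memo.get? x = none → (m.get? x).isSome → ∃ c ∈ l, ctsReach d x c) ∧
     res = l.foldl (fun a c => a.update (m.getD c PySem.Set.empty)) acc ∧
     ((∀ c ∈ l, (memo.get? c).isSome) → m = memo) ∧
     (∀ l', ctsSkip (fun x => (memo.get? x).isSome) l l' →
        ∀ stack f' r, ctsLoop co f' stack m = some r →
          ctsLoop co (f' + l.length * ctsBud N f) (l' ++ stack) memo = some r))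

lemma ctsIter_dead_mono (d : PySem.Dict String String) :
    ∀ a b s, ctsIter d a s = none → a ≤ b → ctsIter d b s = none := by
  intro a
  induction a with
  | zero => intro b s h; simp [ctsIter] at h
  | succ a ih =>
    intro b s h hab
    obtain ⟨b', rfl⟩ : ∃ b', b = b' + 1 := ⟨b - 1, by omega⟩
    rw [ctsIter] at h ⊢
    cases hg : d.get? s with
    | none => rfl
    | some p => rw [hg] at h; exact ih b' p h (by omega)

lemma ctsIter_add (d : PySem.Dict String String) :
    ∀ a b s, ctsIter d (a + b) s = (ctsIter d a s).bind (fun y => ctsIter d b y) := by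
  intro a
  induction a with
  | zero => intro b s; simp [ctsIter]
  | succ a ih =>
    intro b s
    have : a + 1 + b = (a + b) + 1 := by omega
    rw [this, ctsIter, ctsIter]
    cases hg : d.get? s with
    | none => rfl
    | some p => exact ih b p



lemma ctsNoLoop (d : PySem.Dict String String) (N : Nat)
    (hdie : ∀ k v, d.get? k = some v → ctsIter d (N + 1) k = none)
    (c t : String) (hc : d.get? c = some t) (hr : ctsReach d t c) : False := by
  obtain ⟨j, hj⟩ := hr
  have hstep : ctsIter d (j + 1) c = some c := by
    have : ctsIter d (j+1) c = ctsIter d (1+j) c := by rw [Nat.add_comm]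
    rw [this, ctsIter_add]
    simp [ctsIter, hc]
    exact hj
  have hpow : ∀ k, ctsIter d (k * (j + 1)) c = some c := by
    intro k
    induction k with
    | zero => simp [ctsIter]
    | succ k ih =>
      have : (k + 1) * (j + 1) = k * (j + 1) + (j + 1) := by ring
      rw [this, ctsIter_add, ih]
      exact hstep
  have hdead := ctsIter_dead_mono d (N + 1) ((N + 1) * (j + 1)) c (hdie c t hc) (by nlinarith)
  rw [hpow (N + 1)] at hdead
  simp at hdead



lemma ctsAll_visited (co : PySem.Dict String (PySem.Set String)) (f : Nat) (memo) (t : String) (v)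
    (h : memo.get? t = some v) : ctsAll co (f + 1) memo t = some (memo, v) := by
  rw [ctsAll, h]

lemma ctsLoop_mono (co : PySem.Dict String (PySem.Set String)) :
    ∀ f g stack memo r, ctsLoop co f stack memo = some r → f ≤ g → ctsLoop co g stack memo = some r := by
  intro f
  induction f with
  | zero => intro g stack memo r h; simp [ctsLoop] at h
  | succ f ih =>
    intro g stack memo r h hfg
    obtain ⟨g', rfl⟩ : ∃ g', g = g' + 1 := ⟨g - 1, by omega⟩
    cases stack with
    | nil => simpa [ctsLoop] using h
    | cons node stack =>
      rw [ctsLoop] at h ⊢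
      by_cases h1 : memo.contains node
      · simp only [h1, if_true] at h ⊢
        exact ih _ _ _ _ h (by omega)
      · simp only [h1, if_false, Bool.false_eq_true] at h ⊢
        by_cases h2 : ((co.getD node PySem.Set.empty).filter (fun c => !(memo.contains c))).isEmpty
        · simp only [h2, if_true] at h ⊢
          exact ih _ _ _ _ h (by omega)
        · simp only [h2, if_false, Bool.false_eq_true] at h ⊢
          exact ih _ _ _ _ h (by omega)



lemma ctsSkip_mono {P Q : String → Prop} (h : ∀ x, P x → Q x) :
    ∀ {l l'}, ctsSkip P l l' → ctsSkip Q l l' := by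
  intro l l' hs
  induction hs with
  | nil => exact ctsSkip.nil
  | keep x _ ih => exact ctsSkip.keep x ih
  | drop x hp _ ih => exact ctsSkip.drop x (h x hp) ih

lemma ctsSkip_filter (memo : PySem.Dict String (PySem.Set String)) :
    ∀ l : List String, ctsSkip (fun x => (memo.get? x).isSome) l (l.filter (fun c => !(memo.contains c))) := by
  intro l
  induction l with
  | nil => exact ctsSkip.nil
  | cons x l ih =>
    by_cases hx : memo.contains x
    · rw [List.filter_cons_of_neg (by simp [hx])]
      refine ctsSkip.drop x ?_ ih
      rw [PySem.Dict.contains_eq_isSome_get?] at hx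
      exact hx
    · rw [List.filter_cons_of_pos (by simp [hx])]
      exact ctsSkip.keep x ih

lemma ctsBud_pos (N f : Nat) : 1 ≤ ctsBud N f := by
  have : 1 ≤ (N + 2) ^ f := Nat.one_le_pow _ _ (by omega)
  simp [ctsBud]; omega

lemma ctsBud_step (N f len : Nat) (h : len ≤ N) : 2 + len * ctsBud N f ≤ ctsBud N (f + 1) := by
  have h1 : 1 ≤ ctsBud N f := ctsBud_pos N f
  have : ctsBud N (f + 1) = (N + 2) * ctsBud N f := by
    simp [ctsBud, pow_succ]; ring
  rw [this]
  have h2 : len * ctsBud N f ≤ N * ctsBud N f := Nat.mul_le_mul_right _ h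
  nlinarith

lemma ctsPairInj {α β : Type} {a c : α} {b d : β} (h : (some (a, b) : Option (α × β)) = some (c, d)) :
    a = c ∧ b = d := by
  injection h with h1
  exact ⟨congrArg Prod.fst h1, congrArg Prod.snd h1⟩

lemma ctsAll_visited_eq (co : PySem.Dict String (PySem.Set String)) {f : Nat} {memo m} {t : String} {v sc}
    (hv : memo.get? t = some v) (ha : ctsAll co (f + 1) memo t = some (m, sc)) : memo = m ∧ v = sc := by
  rw [ctsAll_visited co f memo t v hv] at ha
  exact ctsPairInj ha

lemma ctsSim (co : PySem.Dict String (PySem.Set String)) (d : PySem.Dict String String) (N : Nat)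
    (hnd : d.keys.Nodup)
    (hmem : ∀ c t, c ∈ co.getD t PySem.Set.empty ↔ (c, t) ∈ d.items)
    (hK : ∀ t, (co.getD t PySem.Set.empty).length ≤ N)
    (hdie : ∀ k v, d.get? k = some v → ctsIter d (N + 1) k = none) :
    ∀ f, ctsAllP co d N f ∧ ctsKidsP co d N f := by
  intro f
  induction f with
  | zero =>
    constructor
    · intro memo t m s h
      rw [ctsAll] at h
      cases h
    · intro l memo acc m res h
      cases l with
      | cons c rest =>
        rw [ctsKids, ctsAll] at h
        cases h
      | nil =>
        rw [ctsKids] at h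
        obtain ⟨rfl, rfl⟩ := ctsPairInj h
        refine ⟨fun x v hv => hv, by simp, ?_, by simp, fun _ => rfl, ?_⟩
        · intro x hn hs
          rw [hn] at hs
          cases hs
        · intro l' hsk stack f' r hloop
          cases hsk
          simpa using hloop
  | succ f ihf =>
    obtain ⟨ihA, ihK⟩ := ihf
    have hAll : ctsAllP co d N (f + 1) := by
      intro memo t m s h
      rw [ctsAll] at h
      cases hv : memo.get? t with
      | some v =>
        rw [hv] at h
        obtain ⟨rfl, rfl⟩ := ctsPairInj h
        refine ⟨fun x w hw => hw, hv, ?_, ?_⟩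
        · intro x hn hs
          rw [hn] at hs
          cases hs
        · intro stack f' r hloop
          obtain ⟨g, hg⟩ : ∃ g, f' + ctsBud N (f + 1) = g + 1 :=
            ⟨f' + ctsBud N (f + 1) - 1, by have := ctsBud_pos N (f + 1); omega⟩
          rw [hg, ctsLoop]
          have hct : memo.contains t = true := by
            rw [PySem.Dict.contains_eq_isSome_get?, hv]; rfl
          rw [if_pos hct]
          exact ctsLoop_mono co f' g stack memo r hloop (by have := ctsBud_pos N (f + 1); omega)
      | none =>
        rw [hv] at h
        cases hk : ctsKids co f memo (co.getD t PySem.Set.empty) (co.getD t PySem.Set.empty) with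
        | none => rw [hk] at h; cases h
        | some mr =>
          obtain ⟨mk, res⟩ := mr
          rw [hk] at h
          obtain ⟨rfl, rfl⟩ := ctsPairInj h
          obtain ⟨K1, K2, K3, K4, K5, K6⟩ := ihK _ _ _ _ _ hk
          have hmkt : mk.get? t = none := by
            cases hmt : mk.get? t with
            | none => rfl
            | some w =>
              exfalso
              obtain ⟨c, hcmem, hreach⟩ := K3 t hv (by rw [hmt]; rfl)
              exact ctsNoLoop d N hdie c t
                (PySem.Dict.get?_of_mem_items d ((hmem c t).mp hcmem) hnd) hreach
          refine ⟨?_, ?_, ?_, ?_⟩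
          · intro x w hw
            have hx : x ≠ t := fun he => by rw [he, hv] at hw; cases hw
            rw [PySem.Dict.get?_insert, if_neg hx]
            exact K1 x w hw
          · exact PySem.Dict.get?_insert_self _ _ _
          · intro x hn hsx
            by_cases hx : x = t
            · exact ⟨0, by rw [hx]; rfl⟩
            · rw [PySem.Dict.get?_insert, if_neg hx] at hsx
              obtain ⟨c, hcmem, j, hj⟩ := K3 x hn hsx
              have hc : d.get? c = some t :=
                PySem.Dict.get?_of_mem_items d ((hmem c t).mp hcmem) hnd
              exact ⟨j + 1, by rw [ctsIter_add d j 1 x, hj]; simp [ctsIter, hc]⟩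
          · intro stack f' r hloop
            obtain ⟨g, hg⟩ : ∃ g, f' + ctsBud N (f + 1) = g + 1 :=
              ⟨f' + ctsBud N (f + 1) - 1, by have := ctsBud_pos N (f + 1); omega⟩
            rw [hg, ctsLoop]
            have hct : memo.contains t = false := by
              rw [PySem.Dict.contains_eq_isSome_get?, hv]; rfl
            simp only [hct, Bool.false_eq_true, if_false]
            by_cases hpe : ((co.getD t PySem.Set.empty).filter (fun c => !(memo.contains c))).isEmpty
            · rw [if_pos hpe]
              have hall : ∀ c ∈ co.getD t PySem.Set.empty, (memo.get? c).isSome := by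
                intro c hcmem
                have hfe := List.isEmpty_iff.mp hpe
                by_contra hns
                have hcf : memo.contains c = false := by
                  rw [PySem.Dict.contains_eq_isSome_get?]
                  simpa using hns
                have : c ∈ (co.getD t PySem.Set.empty).filter (fun c => !(memo.contains c)) := by
                  rw [List.mem_filter]
                  exact ⟨hcmem, by rw [hcf]; rfl⟩
                rw [hfe] at this
                cases this
              have hmm := K5 hall
              have hres : ((co.getD t PySem.Set.empty).foldl
                  (fun s c => s.union (memo.getD c PySem.Set.empty)) (co.getD t PySem.Set.empty)) = res := by
                rw [K4, hmm]; rfl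
              rw [hres]
              rw [hmm] at hloop
              exact ctsLoop_mono co f' g stack _ r hloop (by have := ctsBud_pos N (f + 1); omega)
            · rw [if_neg hpe]
              have h1 : ctsLoop co (f' + 1) (t :: stack) mk = some r := by
                rw [ctsLoop]
                have hctk : mk.contains t = false := by
                  rw [PySem.Dict.contains_eq_isSome_get?, hmkt]; rfl
                simp only [hctk, Bool.false_eq_true, if_false]
                have hpe2 : ((co.getD t PySem.Set.empty).filter (fun c => !(mk.contains c))).isEmpty := by
                  rw [List.isEmpty_iff, List.filter_eq_nil_iff]
                  intro c hcmem
                  have hctc : mk.contains c = true := by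
                    rw [PySem.Dict.contains_eq_isSome_get?]; exact K2 c hcmem
                  simp [hctc]
                rw [if_pos hpe2]
                have hres2 : ((co.getD t PySem.Set.empty).foldl
                    (fun s c => s.union (mk.getD c PySem.Set.empty)) (co.getD t PySem.Set.empty)) = res := by
                  rw [K4]; rfl
                rw [hres2]
                simpa using hloop
              have h2 := K6 _ (ctsSkip_filter memo (co.getD t PySem.Set.empty)) (t :: stack) (f' + 1) r h1
              refine ctsLoop_mono co _ g _ _ _ h2 ?_
              have hlen := hK t
              have hstep := ctsBud_step N f (co.getD t PySem.Set.empty).length hlen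
              omega
    have hKids : ctsKidsP co d N (f + 1) := by
      intro l
      induction l with
      | nil =>
        intro memo acc m res h
        rw [ctsKids] at h
        obtain ⟨rfl, rfl⟩ := ctsPairInj h
        refine ⟨fun x v hv => hv, by simp, ?_, by simp, fun _ => rfl, ?_⟩
        · intro x hn hs
          rw [hn] at hs
          cases hs
        · intro l' hsk stack f' r hloop
          cases hsk
          simpa using hloop
      | cons c rest ihl =>
        intro memo acc m res h
        rw [ctsKids] at h
        cases ha : ctsAll co (f + 1) memo c with
        | none => rw [ha] at h; cases h
        | some ms =>
          obtain ⟨m', sc⟩ := ms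
          rw [ha] at h
          obtain ⟨A1, A2, A3, A4⟩ := hAll _ _ _ _ ha
          obtain ⟨R1, R2, R3, R4, R5, R6⟩ := ihl _ _ _ _ h
          refine ⟨fun x v hv => R1 x v (A1 x v hv), ?_, ?_, ?_, ?_, ?_⟩
          · intro c' hc'
            rcases List.mem_cons.mp hc' with rfl | hc'
            · rw [R1 c' sc A2]; rfl
            · exact R2 c' hc'
          · intro x hn hsx
            cases hm' : m'.get? x with
            | some w => exact ⟨c, by simp, A3 x hn (by rw [hm']; rfl)⟩
            | none =>
              obtain ⟨c', hc', hr⟩ := R3 x hm' hsx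
              exact ⟨c', by simp [hc'], hr⟩
          · rw [R4, List.foldl_cons]
            congr 1
            rw [PySem.Dict.getD_of_get?_eq_some _ _ (R1 c sc A2)]
          · intro hall
            obtain ⟨v, hvc⟩ := Option.isSome_iff_exists.mp (hall c (by simp))
            obtain ⟨rfl, rfl⟩ := ctsAll_visited_eq co hvc ha
            exact R5 (fun c' h' => hall c' (List.mem_cons_of_mem _ h'))
          · intro l' hsk stack f' r hloop
            simp only [List.length_cons]
            cases hsk with
            | keep _ hrest =>
              rename_i l''
              by_cases hcv : (memo.get? c).isSome
              · obtain ⟨v, hvc⟩ := Option.isSome_iff_exists.mp hcv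
                obtain ⟨hm', hsc⟩ := ctsAll_visited_eq co hvc ha
                have hexp : (rest.length + 1) * ctsBud N (f + 1) =
                    rest.length * ctsBud N (f + 1) + ctsBud N (f + 1) := by ring
                obtain ⟨g, hg⟩ : ∃ g, f' + (rest.length + 1) * ctsBud N (f + 1) = g + 1 :=
                  ⟨f' + (rest.length + 1) * ctsBud N (f + 1) - 1, by
                    have := ctsBud_pos N (f + 1); omega⟩
                rw [List.cons_append, hg, ctsLoop]
                have hct : memo.contains c = true := by
                  rw [PySem.Dict.contains_eq_isSome_get?, hvc]; rfl
                rw [if_pos hct]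
                have hR6 := R6 l'' (by rw [hm'] at hrest; exact hrest) stack f' r hloop
                rw [← hm'] at hR6
                refine ctsLoop_mono co _ g _ _ _ hR6 ?_
                have := ctsBud_pos N (f + 1)
                omega
              · have hskm : ctsSkip (fun x => (m'.get? x).isSome) rest l'' := by
                  refine ctsSkip_mono ?_ hrest
                  intro x hx
                  obtain ⟨w, hw⟩ := Option.isSome_iff_exists.mp hx
                  rw [A1 x w hw]; rfl
                have hcont := R6 l'' hskm stack f' r hloop
                have h3 := A4 (l'' ++ stack) (f' + rest.length * ctsBud N (f + 1)) r hcont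
                rw [List.cons_append]
                have hfe : f' + (rest.length + 1) * ctsBud N (f + 1) =
                    f' + rest.length * ctsBud N (f + 1) + ctsBud N (f + 1) := by ring
                rw [hfe]
                exact h3
            | drop _ hp hrest =>
              obtain ⟨v, hvc⟩ := Option.isSome_iff_exists.mp hp
              obtain ⟨hm', hsc⟩ := ctsAll_visited_eq co hvc ha
              have hexp : (rest.length + 1) * ctsBud N (f + 1) =
                  rest.length * ctsBud N (f + 1) + ctsBud N (f + 1) := by ring
              have hR6 := R6 l' (by rw [hm'] at hrest; exact hrest) stack f' r hloop
              rw [← hm'] at hR6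
              refine ctsLoop_mono co _ _ _ _ _ hR6 ?_
              have := ctsBud_pos N (f + 1)
              omega
    exact ⟨hAll, hKids⟩

lemma ctsASucc (co : PySem.Dict String (PySem.Set String)) (d : PySem.Dict String String) (N : Nat)
    (hnd : d.keys.Nodup)
    (hmem : ∀ c t, c ∈ co.getD t PySem.Set.empty ↔ (c, t) ∈ d.items)
    (hdie : ∀ k v, d.get? k = some v → ctsIter d (N + 1) k = none) :
    ∀ f t memo n, ctsIter d n t ≠ none → N + 1 < n + f → (ctsAll co f memo t).isSome := by
  intro f
  induction f with
  | zero =>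
    intro t memo n hit hlt
    exfalso
    obtain ⟨n', rfl⟩ : ∃ n', n = n' + 1 := ⟨n - 1, by omega⟩
    have hit2 := hit
    rw [ctsIter] at hit2
    cases hg : d.get? t with
    | none => rw [hg] at hit2; exact hit2 rfl
    | some p =>
      exact hit (ctsIter_dead_mono d (N + 1) (n' + 1) t (hdie t p hg) (by omega))
  | succ f ih =>
    intro t memo n hit hlt
    rw [ctsAll]
    cases hv : memo.get? t with
    | some s => simp
    | none =>
      have hkids : ∀ (l : List String) (memo' : PySem.Dict String (PySem.Set String)) (acc : PySem.Set String),
          (∀ c ∈ l, c ∈ co.getD t PySem.Set.empty) → (ctsKids co f memo' l acc).isSome := by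
        intro l
        induction l with
        | nil => intro memo' acc _; rw [ctsKids]; simp
        | cons c rest ihl =>
          intro memo' acc hsub
          rw [ctsKids]
          have hc : d.get? c = some t :=
            PySem.Dict.get?_of_mem_items d ((hmem c t).mp (hsub c (by simp))) hnd
          have hit' : ctsIter d (n + 1) c ≠ none := by
            simpa [ctsIter, hc] using hit
          have := ih c memo' (n + 1) hit' (by omega)
          cases ha : ctsAll co f memo' c with
          | none => rw [ha] at this; exact absurd this (by simp)
          | some ms =>
            obtain ⟨m, s⟩ := ms
            exact ihl m (acc.update s) (fun c' h' => hsub c' (by simp [h']))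
      have := hkids (co.getD t PySem.Set.empty) memo (co.getD t PySem.Set.empty) (fun c h => h)
      cases hk : ctsKids co f memo (co.getD t PySem.Set.empty) (co.getD t PySem.Set.empty) with
      | none => rw [hk] at this; exact absurd this (by simp)
      | some mr => obtain ⟨m, res⟩ := mr; simp

lemma ctsChildren_aux (l : List (String × String)) :
    ∀ (co0 : PySem.Dict String (PySem.Set String)) (c t : String),
      c ∈ (l.foldl (fun co cp => co.modify cp.2 PySem.Set.empty (fun s => s.add cp.1)) co0).getD t PySem.Set.empty ↔
        c ∈ co0.getD t PySem.Set.empty ∨ (c, t) ∈ l := by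
  induction l with
  | nil => simp
  | cons cp l ih =>
    intro co0 c t
    obtain ⟨c0, p0⟩ := cp
    rw [List.foldl_cons, ih, PySem.Dict.getD_modify]
    by_cases ht : t = p0
    · subst ht
      simp only [if_true, PySem.Set.mem_add, List.mem_cons, Prod.mk.injEq, and_true]
      tauto
    · rw [if_neg ht]
      simp only [List.mem_cons, Prod.mk.injEq]
      tauto

lemma ctsSetAdd_len {s : PySem.Set String} {x : String} : (s.add x).length ≤ s.length + 1 := by
  unfold PySem.Set.add
  split <;> simp

lemma ctsChildren_len_aux (l : List (String × String)) :
    ∀ (co0 : PySem.Dict String (PySem.Set String)) (t : String),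
      ((l.foldl (fun co cp => co.modify cp.2 PySem.Set.empty (fun s => s.add cp.1)) co0).getD t PySem.Set.empty).length ≤
        (co0.getD t PySem.Set.empty).length + l.length := by
  induction l with
  | nil => simp
  | cons cp l ih =>
    intro co0 t
    rw [List.foldl_cons]
    refine le_trans (ih _ t) ?_
    have hb : (((co0.modify cp.2 PySem.Set.empty (fun s => s.add cp.1)).getD t PySem.Set.empty)).length ≤
        (co0.getD t PySem.Set.empty).length + 1 := by
      rw [PySem.Dict.getD_modify]
      by_cases ht : t = cp.2
      · subst ht
        rw [if_pos rfl]
        exact ctsSetAdd_len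
      · rw [if_neg ht]; omega
    simp only [List.length_cons]
    omega

lemma ctsDictUpdate_len (l : List (String × String)) :
    ∀ (d0 : PySem.Dict String String), ((d0.update l).items).length ≤ d0.items.length + l.length := by
  induction l with
  | nil => intro d0; simp [PySem.Dict.update]
  | cons p l ih =>
    intro d0
    unfold PySem.Dict.update at ih ⊢
    rw [List.foldl_cons]
    refine le_trans (ih (d0.insert p.1 p.2)) ?_
    have := PySem.Dict.size_insert d0 p.1 p.2
    unfold PySem.Dict.size at this
    simp only [List.length_cons]
    split at this <;> omega

lemma ctsChildren_mem (parent_of : List (String × String)) (c t : String) :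
    c ∈ (ctsChildrenA parent_of).getD t PySem.Set.empty ↔
      (c, t) ∈ (PySem.Dict.ofList parent_of).items := by
  unfold ctsChildrenA
  rw [ctsChildren_aux]
  simp [PySem.Dict.getD_empty, PySem.Set.empty]

lemma ctsChildren_len (parent_of : List (String × String)) (t : String) :
    ((ctsChildrenA parent_of).getD t PySem.Set.empty).length ≤ parent_of.length := by
  unfold ctsChildrenA
  refine le_trans (ctsChildren_len_aux _ _ t) ?_
  have h3 := ctsDictUpdate_len parent_of PySem.Dict.empty
  have he : (PySem.Dict.empty : PySem.Dict String String).items = [] := rfl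
  rw [he] at h3
  simp only [List.length_nil, Nat.zero_add] at h3
  have hgd : ((PySem.Dict.empty : PySem.Dict String (PySem.Set String)).getD t PySem.Set.empty) = PySem.Set.empty :=
    PySem.Dict.getD_empty _ _
  rw [hgd]
  have : (PySem.Set.empty : PySem.Set String).length = 0 := rfl
  rw [this]
  simpa [PySem.Dict.ofList] using h3

lemma ctsOfList_mem_items (parent_of : List (String × String)) (p : String × String)
    (h : p ∈ (PySem.Dict.ofList parent_of).items) : p ∈ parent_of := by
  have haux : ∀ (l : List (String × String)) (d0 : PySem.Dict String String),
      p ∈ (d0.update l).items → p ∈ d0.items ∨ p ∈ l := by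
    intro l
    induction l with
    | nil => intro d0 h; exact Or.inl (by simpa [PySem.Dict.update] using h)
    | cons q l ih =>
      intro d0 h
      unfold PySem.Dict.update at h ih
      rw [List.foldl_cons] at h
      rcases ih (d0.insert q.1 q.2) h with h' | h'
      · rcases (PySem.Dict.mem_items_insert _ _ _ _).mp h' with h'' | h''
        · exact Or.inr (by rw [h'']; exact List.mem_cons_self)
        · exact Or.inl h''.1
      · exact Or.inr (List.mem_cons_of_mem _ h')
  rcases haux parent_of PySem.Dict.empty h with h' | h'
  · simp [show (PySem.Dict.empty : PySem.Dict String String).items = [] from rfl] at h'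
  · exact h'

-- ===== VERDICT (by name: the statement is the Claim_ definition above) =====
theorem compute_transitive_subtypes_spec : Claim_equal_compute_transitive_subtypes := by
  intro parent_of hdom hpre
  unfold Spec_compute_transitive_subtypes
  have hnd := PySem.Dict.nodup_keys_ofList parent_of
  have hmem : ∀ c t, c ∈ (ctsChildrenA parent_of).getD t PySem.Set.empty ↔
      (c, t) ∈ (PySem.Dict.ofList parent_of).items := fun c t => ctsChildren_mem parent_of c t
  have hdie : ∀ k v, (PySem.Dict.ofList parent_of).get? k = some v →
      ctsIter (PySem.Dict.ofList parent_of) (parent_of.length + 1) k = none := by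
    intro k v hkv
    exact hpre (k, v) (ctsOfList_mem_items parent_of (k, v)
      (PySem.Dict.mem_items_of_get?_eq_some _ hkv))
  have hsim := ctsSim (ctsChildrenA parent_of) (PySem.Dict.ofList parent_of) parent_of.length
    hnd hmem (ctsChildren_len parent_of) hdie
  have hsucc := ctsASucc (ctsChildrenA parent_of) (PySem.Dict.ofList parent_of) parent_of.length
    hnd hmem hdie
  have main : ∀ (ks : List String) (memo : PySem.Dict String (PySem.Set String)),
      ks.foldl (fun memo t =>
        match ctsAll (ctsChildrenA parent_of) (parent_of.length + 2) memo t with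
        | some (m, _) => m
        | none => memo) memo
      = ks.foldl (fun memo root =>
        match ctsLoop (ctsChildrenA parent_of)
            (2 * (parent_of.length + 2) ^ (parent_of.length + 2) + 1) [root] memo with
        | some m => m
        | none => memo) memo := by
    intro ks
    induction ks with
    | nil => intro memo; rfl
    | cons t ks ih =>
      intro memo
      rw [List.foldl_cons, List.foldl_cons]
      have hs := hsucc (parent_of.length + 2) t memo 0 (by simp [ctsIter]) (by omega)
      cases ha : ctsAll (ctsChildrenA parent_of) (parent_of.length + 2) memo t with
      | none => rw [ha] at hs; cases hs
      | some ms =>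
        obtain ⟨m, sres⟩ := ms
        obtain ⟨A1, A2, A3, A4⟩ := (hsim (parent_of.length + 2)).1 _ _ _ _ ha
        have hloop0 : ctsLoop (ctsChildrenA parent_of) 1 [] m = some m := by
          rw [ctsLoop]
        have hl := A4 [] 1 m hloop0
        have hfuel : 1 + ctsBud parent_of.length (parent_of.length + 2) =
            2 * (parent_of.length + 2) ^ (parent_of.length + 2) + 1 := by
          unfold ctsBud; omega
        rw [hfuel] at hl
        rw [hl]
        exact ih m
  exact congrArg PySem.Dict.items (main (ctsChildrenA parent_of).keys PySem.Dict.empty)
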